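-- pv_equiv track=rewrite | github.com/BTECHMEMORIES/metro-navigation-system | Lodash.py | to_normal
-- ===== SOURCE A (Python) =====
-- def to_normal(s: str) -> str:
--     normal_str = ""
--     f_flag = True
--
--     for chr_ in s:
--         if f_flag:
--             normal_str += chr_.upper()
--             f_flag = False
--         elif chr_ == '-':
--             normal_str += " "
--             f_flag = True
--         else:
--             normal_str += chr_
--
--     return normal_str
-- ===== SOURCE B (Python) =====
-- def to_normal(s: str) -> str:
--     pieces = []
--     rest = s
--     while rest:
--         head, rest = rest[0], rest[1:]
--         body, sep, rest = rest.partition('-')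
--         pieces.append(head.upper() + body + (' ' if sep else ''))
--     return ''.join(pieces)
-- ===== Notes on version B (the rewrite author's own statement) =====
-- stated objective: idiomatic
-- what changed: Replaces A's per-character boolean-flag state machine with a segment-wise loop that uses str.partition to consume one hyphen-delimited piece at a time and joins the pieces at the end.
import Mathlib
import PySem

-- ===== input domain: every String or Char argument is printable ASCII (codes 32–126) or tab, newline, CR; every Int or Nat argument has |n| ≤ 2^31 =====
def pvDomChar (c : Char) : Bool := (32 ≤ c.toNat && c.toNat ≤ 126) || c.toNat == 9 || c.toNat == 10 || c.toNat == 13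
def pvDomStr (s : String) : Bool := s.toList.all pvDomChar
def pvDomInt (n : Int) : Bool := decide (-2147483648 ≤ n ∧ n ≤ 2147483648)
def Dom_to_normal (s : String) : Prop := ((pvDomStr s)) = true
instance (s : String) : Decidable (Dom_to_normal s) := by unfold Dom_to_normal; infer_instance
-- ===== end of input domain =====

-- B replaces A's per-character flag state machine by a segment-wise scan (str.partition on '-'), joining pieces at the end; objective: idiomatic.


-- ===== PORT A =====
-- Python A: flag-driven loop over the characters, accumulating normal_str.
def to_normal (s : String) : String :=
  String.ofList
    ((s.toList.foldl
      (fun (st : List Char × Bool) chr_ =>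
        if st.2 then (st.1 ++ PySem.Chars.upper [chr_], false)
        else if chr_ = '-' then (st.1 ++ [' '], true)
        else (st.1 ++ [chr_], false))
      ([], true)).1)

-- ===== PORT B =====
-- B's loop: take the head char, partition the rest at the first '-', emit one piece, recurse on the after-part.
def toNormalAltGo : List Char → List Char
  | [] => []
  | head :: rest =>
    let body := rest.takeWhile (· ≠ '-')       -- partition: part before the first '-'
    match hdrop : rest.dropWhile (· ≠ '-') with   -- partition: separator + part after
    | [] => PySem.Chars.upper [head] ++ body
    | _ :: after => PySem.Chars.upper [head] ++ body ++ [' '] ++ toNormalAltGo after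
termination_by l => l.length
decreasing_by
  have h := List.length_dropWhile_le (p := fun c => decide (c ≠ '-')) (l := rest)
  rw [hdrop] at h; simp at h ⊢; omega

def to_normal_alt (s : String) : String := String.ofList (toNormalAltGo s.toList)

-- ===== PRECONDITION & SPEC =====
def Spec_to_normal (s : String) (out : String) : Prop := out = to_normal_alt s
instance (s : String) (out : String) : Decidable (Spec_to_normal s out) := by unfold Spec_to_normal; infer_instance

-- ===== CLAIM (what is proved, stated in full; the proofs are below) =====
def Claim_equal_to_normal : Prop := ∀ (s : String), Dom_to_normal s → Spec_to_normal s (to_normal s)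

-- ===== LEMMAS AND PROOFS =====

-- A's state machine, with the accumulator factored out.
def runA : Bool → List Char → List Char
  | _, [] => []
  | true, c :: t => PySem.Chars.upper [c] ++ runA false t
  | false, c :: t => if c = '-' then ' ' :: runA true t else c :: runA false t

theorem foldl_runA (l : List Char) (acc : List Char) (flag : Bool) :
    (l.foldl
      (fun (st : List Char × Bool) chr_ =>
        if st.2 then (st.1 ++ PySem.Chars.upper [chr_], false)
        else if chr_ = '-' then (st.1 ++ [' '], true)
        else (st.1 ++ [chr_], false))
      (acc, flag)).1 = acc ++ runA flag l := by
  induction l generalizing acc flag with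
  | nil => simp [runA]
  | cons c t ih =>
    cases flag with
    | true => simp [runA, ih]
    | false =>
      by_cases hc : c = '-' <;> simp [runA, hc, ih]

theorem runA_false_eq (t : List Char) :
    runA false t = t.takeWhile (· ≠ '-') ++
      (match t.dropWhile (· ≠ '-') with
       | [] => []
       | _ :: after => ' ' :: runA true after) := by
  induction t with
  | nil => simp [runA]
  | cons c t ih =>
    by_cases hc : c = '-'
    · simp [runA, hc]
    · simp [runA, hc, ih]

theorem runA_true_eq_aux (n : Nat) : ∀ l : List Char, l.length ≤ n → runA true l = toNormalAltGo l := by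
  induction n with
  | zero =>
    intro l hl
    cases l with
    | nil => simp [runA, toNormalAltGo]
    | cons c t => simp at hl
  | succ n ih =>
    intro l hl
    cases l with
    | nil => simp [runA, toNormalAltGo]
    | cons c t =>
      rw [toNormalAltGo]
      simp only [runA, runA_false_eq]
      cases hdrop : t.dropWhile (· ≠ '-') with
      | nil => simp
      | cons x after =>
        have h1 := List.length_dropWhile_le (p := fun c => decide (c ≠ '-')) (l := t)
        rw [hdrop] at h1
        simp at h1 hl
        simp [ih after (by omega)]

theorem runA_true_eq (l : List Char) : runA true l = toNormalAltGo l :=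
  runA_true_eq_aux l.length l (le_refl _)

-- ===== VERDICT (by name: the statement is the Claim_ definition above) =====
theorem to_normal_spec : Claim_equal_to_normal := by
  intro s _
  unfold Spec_to_normal to_normal to_normal_alt
  rw [foldl_runA, runA_true_eq]
  simp
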